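-- pv_equiv track=rewrite | github.com/epoyraz/leetcode | solutions/2647.py | findValidSplit
-- ===== SOURCE A (Python) =====
-- import math
--
-- def findValidSplit(nums):
--     n = len(nums)
--     if n < 2:
--         return -1
--
--     # 1) Find primes up to sqrt(max(nums))
--     M = max(nums)
--     limit = int(math.sqrt(M)) + 1
--     sieve = [True] * (limit + 1)
--     sieve[0] = sieve[1] = False
--     primes = []
--     for i in range(2, limit + 1):
--         if sieve[i]:
--             primes.append(i)
--             for j in range(i * i, limit + 1, i):
--                 sieve[j] = False
--
--     # 2) Record first/last index for each prime factor
--     first = {}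
--     last = {}
--     for idx, v in enumerate(nums):
--         x = v
--         seen = set()
--         for p in primes:
--             if p * p > x:
--                 break
--             if x % p == 0:
--                 seen.add(p)
--                 while x % p == 0:
--                     x //= p
--         if x > 1:
--             seen.add(x)
--         for p in seen:
--             if p not in first:
--                 first[p] = idx
--             last[p] = idx
--
--     # 3) Mark forbidden split-intervals via a difference array
--     diff = [0] * (n + 1)
--     for p in first:
--         a, b = first[p], last[p]
--         if a < b:
--             diff[a] += 1
--             diff[b] -= 1
--
--     # 4) Prefix-sum and find smallest valid split i in [0..n-2]
--     cover = 0
--     for i in range(n - 1):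
--         cover += diff[i]
--         if cover == 0:
--             return i
--
--     return -1
-- ===== SOURCE B (Python) =====
-- def _factors(x):
--     # distinct prime factors of x in increasing order (empty for x < 2)
--     fs = []
--     d = 2
--     while d * d <= x:
--         if x % d == 0:
--             fs.append(d)
--             while x % d == 0:
--                 x //= d
--         d += 1
--     if x > 1:
--         fs.append(x)
--     return fs
--
--
-- def findValidSplit(nums):
--     n = len(nums)
--     if n < 2:
--         return -1
--
--     # first/last index at which each prime factor occurs (no sieve: direct
--     # trial division per element)
--     first = {}
--     last = {}
--     for idx, v in enumerate(nums):
--         for p in _factors(v):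
--             if p not in first:
--                 first[p] = idx
--             last[p] = idx
--
--     # farthest-reach sweep: reach[i] = farthest index a prime first seen at i
--     # forces the left part to extend to; curEnd is a running maximum.
--     reach = list(range(n))
--     for p in first:
--         if reach[first[p]] < last[p]:
--             reach[first[p]] = last[p]
--
--     curEnd = 0
--     for i in range(n - 1):
--         if curEnd < reach[i]:
--             curEnd = reach[i]
--         if curEnd <= i:
--             return i
--     return -1
-- ===== Notes on version B (the rewrite author's own statement) =====
-- stated objective: simpler
-- what changed: B drops the sieve entirely and factors each element by direct trial division, and replaces the difference-array coverage counter with a farthest-reach array swept with a running maximum.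
import Mathlib
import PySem

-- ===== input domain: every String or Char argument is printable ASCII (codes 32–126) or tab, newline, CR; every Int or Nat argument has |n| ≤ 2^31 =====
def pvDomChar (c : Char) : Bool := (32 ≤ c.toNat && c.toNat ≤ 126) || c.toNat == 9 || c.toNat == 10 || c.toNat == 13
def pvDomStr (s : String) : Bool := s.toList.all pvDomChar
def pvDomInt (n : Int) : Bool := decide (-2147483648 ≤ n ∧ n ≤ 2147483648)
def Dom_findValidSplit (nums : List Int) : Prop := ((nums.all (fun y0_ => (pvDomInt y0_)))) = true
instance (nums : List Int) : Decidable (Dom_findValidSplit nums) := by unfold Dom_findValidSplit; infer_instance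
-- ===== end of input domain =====

-- B drops A's sieve (it factors each element by direct trial division over all candidate
-- divisors) and replaces A's difference-array coverage count by a farthest-reach array swept
-- with a running maximum (objective: simpler — no sieve, no math import; not claimed faster).
-- NOTE: the iteration ORDER of Python's `for p in _factors/seen:` / `for p in first:` is
-- list order resp. hash order; the final return value is independent of that order (the
-- diff/reach arrays are built by commutative updates), so the ports are value-exact.

-- ===== PORT A =====
-- while x % p == 0: x //= p   (fuel x.toNat bounds the division count; only reached with x ≥ p*p ≥ 4)
def pvDivOut : Nat → Int → Int → Int
  | 0, _, x => x
  | f+1, p, x => if PySem.Int.mod x p = 0 then pvDivOut f p (PySem.Int.floordiv x p) else x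

-- for p in primes: if p*p > x: break; if x % p == 0: seen.add(p); while x % p == 0: x //= p
def pvTrial : List Int → Int → PySem.Set Int → Int × PySem.Set Int
  | [], x, seen => (x, seen)
  | p :: rest, x, seen =>
    if p * p > x then (x, seen)
    else if PySem.Int.mod x p = 0 then
      pvTrial rest (pvDivOut x.toNat p x) (PySem.Set.add seen p)
    else pvTrial rest x seen

def pvPrimeSet (primes : List Int) (v : Int) : PySem.Set Int :=
  let r := pvTrial primes v PySem.Set.empty
  if r.1 > 1 then PySem.Set.add r.2 r.1 else r.2

-- sieve body: if sieve[i]: primes.append(i); for j in range(i*i, limit+1, i): sieve[j] = False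
-- (indices are nonnegative and in range, so .toNat / Array.setIfInBounds are exact)
def pvSieveStep (limit : Nat) (st : List Int × Array Bool) (i : Int) : List Int × Array Bool :=
  if st.2.getD i.toNat false then
    (st.1 ++ [i], (PySem.List.pyRange (i*i) ((limit : Int)+1) i).foldl (fun s j => s.setIfInBounds j.toNat false) st.2)
  else st

def pvPrimes (limit : Nat) : List Int :=
  let sieve := ((Array.replicate (limit+1) true).setIfInBounds 0 false).setIfInBounds 1 false
  ((PySem.List.pyRange 2 ((limit : Int)+1) 1).foldl (pvSieveStep limit) ([], sieve)).1

-- steps 1–2 of A: M = max(nums); limit = int(math.sqrt(M)) + 1; first/last per prime factor.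
-- int(math.sqrt(M)) = Nat.sqrt M.toNat exactly for the 0 ≤ M ≤ 2^31 admitted by Dom/Pre_;
-- max(nums) is only consulted when nums ≠ [] (n ≥ 2), so .getD 0 is exact.
def pvFirstLast (nums : List Int) : PySem.Dict Int Int × PySem.Dict Int Int :=
  let M := ((PySem.List.max? nums (fun y => y)).getD 0)
  let limit := Nat.sqrt M.toNat + 1
  let primes := pvPrimes limit
  (PySem.List.enumerate nums 0).foldl
    (fun fl iv =>
      (pvPrimeSet primes iv.2).foldl
        (fun fl p =>
          (if fl.1.contains p then fl.1 else fl.1.insert p iv.1, fl.2.insert p iv.1))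
        fl)
    (PySem.Dict.empty, PySem.Dict.empty)

-- step 4 of A: cover += diff[i]; if cover == 0: return i  (early return ⇒ recursion on the range list)
def pvScanA : List Int → Int → List Int → Int
  | [], _, _ => -1
  | i :: rest, cover, diff =>
    let cover' := cover + PySem.List.pyGetD diff i 0
    if cover' = 0 then i else pvScanA rest cover' diff

def findValidSplit (nums : List Int) : Int :=
  let n := nums.length
  if n < 2 then -1 else
  let fl := pvFirstLast nums
  -- step 3 of A: diff[a] += 1; diff[b] -= 1 for each prime interval with a < b
  -- (first[p]/last[p]: the key is present, so .getD 0 is exact; indices are in [0, n))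
  let diff := fl.1.keys.foldl
    (fun (diff : List Int) p =>
      let a := (fl.1.get? p).getD 0
      let b := (fl.2.get? p).getD 0
      if a < b then
        let d1 := diff.set a.toNat (PySem.List.pyGetD diff a 0 + 1)
        d1.set b.toNat (PySem.List.pyGetD d1 b 0 - 1)
      else diff)
    (List.replicate (n+1) 0)
  pvScanA (PySem.List.pyRange 0 ((n : Int)-1) 1) 0 diff

-- ===== PORT B =====
-- B's inner while x % d == 0: x //= d  (fuel bounds the division count)
def pvBReduce : Nat → Int → Int → Int
  | 0, _, x => x
  | f+1, d, x => if PySem.Int.mod x d = 0 then pvBReduce f d (PySem.Int.floordiv x d) else x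

-- _factors' loop: d = 2; while d*d <= x: if x % d == 0: fs.append(d); divide out; d += 1
-- (fuel: the loop exits once d*d > x and d only grows, so x.toNat + 2 steps always suffice)
def pvBTrial : Nat → Int → Int → List Int → Int × List Int
  | 0, _, x, fs => (x, fs)
  | f+1, d, x, fs =>
    if d * d ≤ x then
      if PySem.Int.mod x d = 0 then pvBTrial f (d+1) (pvBReduce x.toNat d x) (fs ++ [d])
      else pvBTrial f (d+1) x fs
    else (x, fs)

-- _factors(x): distinct prime factors in increasing order
def pvBFactors (x : Int) : List Int :=
  let r := pvBTrial (x.toNat + 2) 2 x []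
  if r.1 > 1 then r.2 ++ [r.1] else r.2

-- first/last index at which each prime factor occurs
def pvFirstLastB (nums : List Int) : PySem.Dict Int Int × PySem.Dict Int Int :=
  (PySem.List.enumerate nums 0).foldl
    (fun fl iv =>
      (pvBFactors iv.2).foldl
        (fun fl p =>
          (if fl.1.contains p then fl.1 else fl.1.insert p iv.1, fl.2.insert p iv.1))
        fl)
    (PySem.Dict.empty, PySem.Dict.empty)

-- B's sweep: if curEnd < reach[i]: curEnd = reach[i]; if curEnd <= i: return i
def pvScanB : List Int → Int → List Int → Int
  | [], _, _ => -1
  | i :: rest, curEnd, reach =>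
    let r := PySem.List.pyGetD reach i 0
    let curEnd' := if curEnd < r then r else curEnd
    if curEnd' ≤ i then i else pvScanB rest curEnd' reach

def findValidSplit_alt (nums : List Int) : Int :=
  let n := nums.length
  if n < 2 then -1 else
  let fl := pvFirstLastB nums
  -- reach = list(range(n)); reach[first[p]] = max(reach[first[p]], last[p]) per prime
  let reach := fl.1.keys.foldl
    (fun (reach : List Int) p =>
      let a := (fl.1.get? p).getD 0
      let b := (fl.2.get? p).getD 0
      if PySem.List.pyGetD reach a 0 < b then reach.set a.toNat b else reach)
    (PySem.List.pyRange 0 (n : Int) 1)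
  pvScanB (PySem.List.pyRange 0 ((n : Int)-1) 1) 0 reach

-- ===== PRECONDITION & SPEC =====
-- Pre_ excludes exactly the inputs where Python A raises: with n ≥ 2 and max(nums) < 0,
-- math.sqrt(M) raises ValueError.
def Pre_findValidSplit (nums : List Int) : Prop :=
  nums.length < 2 ∨ ∃ x ∈ nums, 0 ≤ x
instance (nums : List Int) : Decidable (Pre_findValidSplit nums) := by
  unfold Pre_findValidSplit; infer_instance

def pvWitness_findValidSplit : List Int := [2, 3]

def Spec_findValidSplit (nums : List Int) (out : Int) : Prop := out = findValidSplit_alt nums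
instance (nums : List Int) (out : Int) : Decidable (Spec_findValidSplit nums out) := by unfold Spec_findValidSplit; infer_instance

-- ===== CLAIM (what is proved, stated in full; the proofs are below) =====
def Claim_equal_findValidSplit : Prop := ∀ (nums : List Int), Dom_findValidSplit nums → Pre_findValidSplit nums → Spec_findValidSplit nums (findValidSplit nums)

-- ===== LEMMAS AND PROOFS =====

-- ---------- part 1: A's factorization (sieve + trial over primes) = B's trial division ----------

-- the increasing list of primes in [a, b], as Ints (reference value of A's sieve)
def pvIntPrimes (a b : Nat) : List Int :=
  List.map (fun m : Nat => (m : Int)) (List.filter (fun m => decide (Nat.Prime m)) (List.range' a (b + 1 - a)))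
theorem pvIntPrimes_eq_nil (a b : Nat) (h : b < a) : pvIntPrimes a b = [] := by
  unfold pvIntPrimes
  rw [show b + 1 - a = 0 by omega]
  rfl
theorem pvIntPrimes_step (a b : Nat) (h : a ≤ b) :
    pvIntPrimes a b = (if Nat.Prime a then [(a : Int)] else []) ++ pvIntPrimes (a+1) b := by
  unfold pvIntPrimes
  rw [show b + 1 - a = (b + 1 - (a+1)) + 1 by omega, List.range'_succ, List.filter_cons]
  by_cases hp : Nat.Prime a <;> simp [hp]
theorem pvIntPrimes_mem (a b : Nat) (q : Int) (h : q ∈ pvIntPrimes a b) :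
    ∃ m : Nat, q = (m : Int) ∧ a ≤ m ∧ m ≤ b ∧ Nat.Prime m := by
  simp only [pvIntPrimes, List.mem_map] at h
  obtain ⟨m, hm, hq⟩ := h
  rw [List.mem_filter] at hm
  rw [List.mem_range'] at hm
  have hp : Nat.Prime m := by simpa using hm.2
  obtain ⟨⟨i, hi, hmi⟩, -⟩ := hm
  exact ⟨m, hq.symm, by omega, by omega, hp⟩

theorem pvIntPrimes_concat (k : Nat) (h2 : 2 ≤ k) (hp : Nat.Prime k) :
    pvIntPrimes 2 k = pvIntPrimes 2 (k-1) ++ [(k : Int)] := by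
  unfold pvIntPrimes
  rw [show k + 1 - 2 = (k - 2) + 1 by omega, List.range'_1_concat, List.filter_append,
    List.map_append, show k - 1 + 1 - 2 = k - 2 by omega, show 2 + (k-2) = k by omega]
  simp [hp]

theorem pvIntPrimes_concat_not (k : Nat) (h2 : 2 ≤ k) (hp : ¬ Nat.Prime k) :
    pvIntPrimes 2 k = pvIntPrimes 2 (k-1) := by
  unfold pvIntPrimes
  rw [show k + 1 - 2 = (k - 2) + 1 by omega, List.range'_1_concat, List.filter_append,
    List.map_append, show k - 1 + 1 - 2 = k - 2 by omega, show 2 + (k-2) = k by omega]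
  simp [hp]

theorem pv_reduce_eq (f : Nat) : ∀ (d x : Int), pvDivOut f d x = pvBReduce f d x := by
  induction f with
  | zero => intro d x; rfl
  | succ f ih => intro d x; simp only [pvDivOut, pvBReduce, ih]

theorem pv_reduce_spec (f : Nat) : ∀ (d x : Int), 2 ≤ d → 1 ≤ x → x ≤ (f : Int) →
    pvBReduce f d x ∣ x ∧ 1 ≤ pvBReduce f d x ∧ pvBReduce f d x ≤ x ∧ ¬ d ∣ pvBReduce f d x := by
  induction f with
  | zero => intro d x h2 h1 hf; exfalso; omega
  | succ f ih =>
    intro d x h2 h1 hf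
    rw [pvBReduce]
    by_cases hdX : PySem.Int.mod x d = 0
    · rw [if_pos hdX]
      have hdvd : d ∣ x := (PySem.Int.mod_eq_zero_iff_dvd x d).mp hdX
      obtain ⟨c, hc⟩ := hdvd
      have hfd : PySem.Int.floordiv x d = c := by
        rw [PySem.Int.floordiv_eq_ediv_of_pos (by omega), hc, Int.mul_ediv_cancel_left c (by omega)]
      rw [hfd]
      have hc1 : 1 ≤ c := by nlinarith
      have hcx : 2*c ≤ x := by nlinarith
      have hcf : c ≤ (f : Int) := by push_cast at hf ⊢; omega
      obtain ⟨hdvd', h1', hle', hnd'⟩ := ih d c h2 hc1 hcf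
      refine ⟨hdvd'.trans ⟨d, by rw [hc]; ring⟩, h1', by omega, hnd'⟩
    · rw [if_neg hdX]
      exact ⟨dvd_refl x, h1, le_refl x, fun h => hdX ((PySem.Int.mod_eq_zero_iff_dvd x d).mpr h)⟩

theorem pv_trial_break (limit : Nat) (d x : Int) (acc : PySem.Set Int) (h2 : 2 ≤ d)
    (hgt : x < d * d) : pvTrial (pvIntPrimes d.toNat limit) x acc = (x, acc) := by
  cases hl : pvIntPrimes d.toNat limit with
  | nil => rfl
  | cons p rest =>
    have hp := pvIntPrimes_mem _ _ p (hl ▸ List.mem_cons_self ..)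
    obtain ⟨m, rfl, hdm, hmb, hmp⟩ := hp
    have hdp : d ≤ (m : Int) := by omega
    have hx : x < (m:Int) * (m:Int) := lt_of_lt_of_le hgt (mul_le_mul hdp hdp (by omega) (by omega))
    simp only [pvTrial]
    rw [if_pos hx]

theorem pv_sim (limit : Nat) : ∀ (f : Nat) (d x : Int) (acc : List Int),
    2 ≤ d →
    x + 2 ≤ (f : Int) + d →
    (∀ e : Int, 2 ≤ e → e < d → ¬ e ∣ x) →
    (∀ p : Nat, Nat.Prime p → (p : Int) * (p : Int) ≤ x → p ≤ limit) →
    (∀ q ∈ acc, 2 ≤ q ∧ ¬ q ∣ x) →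
    pvTrial (pvIntPrimes d.toNat limit) x acc = pvBTrial f d x acc ∧
    (∀ q ∈ (pvBTrial f d x acc).2, 2 ≤ q ∧ ¬ q ∣ (pvBTrial f d x acc).1) := by
  intro f
  induction f with
  | zero =>
    intro d x acc h2 hf hdiv hcov hacc
    have hgt : x < d * d := by push_cast at hf; nlinarith [mul_self_nonneg (d-1)]
    refine ⟨?_, ?_⟩
    · rw [pv_trial_break limit d x acc h2 hgt]; rfl
    · simpa [pvBTrial] using hacc
  | succ f ih =>
    intro d x acc h2 hf hdiv hcov hacc
    by_cases hle : d * d ≤ x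
    · have hx4 : 4 ≤ x := by nlinarith
      have htn1 : (d+1).toNat = d.toNat + 1 := by omega
      by_cases hp : Nat.Prime d.toNat
      · have hdN : ((d.toNat : Nat) : Int) = d := by omega
        have hdlim : d.toNat ≤ limit := hcov d.toNat hp (by rw [hdN]; exact hle)
        have hlist : pvIntPrimes d.toNat limit = d :: pvIntPrimes (d.toNat + 1) limit := by
          rw [pvIntPrimes_step d.toNat limit hdlim, if_pos hp]
          simp [hdN]
        by_cases hmod : PySem.Int.mod x d = 0
        · have hdvd : d ∣ x := (PySem.Int.mod_eq_zero_iff_dvd x d).mp hmod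
          obtain ⟨hrdvd, hr1, hrle, hrnd⟩ := pv_reduce_spec x.toNat d x h2 (by omega) (by omega)
          have hnotmem : d ∉ acc := fun hmem => (hacc d hmem).2 hdvd
          have hadd : PySem.Set.add acc d = acc ++ [d] := by
            simp [PySem.Set.add, hnotmem]
          have hAside : pvTrial (pvIntPrimes d.toNat limit) x acc
              = pvTrial (pvIntPrimes (d.toNat+1) limit) (pvBReduce x.toNat d x) (acc ++ [d]) := by
            rw [hlist]
            simp only [pvTrial]
            rw [if_neg (by omega : ¬ d*d > x), if_pos hmod, pv_reduce_eq, hadd]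
          have hB : pvBTrial (f+1) d x acc = pvBTrial f (d+1) (pvBReduce x.toNat d x) (acc ++ [d]) := by
            simp only [pvBTrial]
            rw [if_pos hle, if_pos hmod]
          set x' := pvBReduce x.toNat d x with hx'
          have ihh := ih (d+1) x' (acc ++ [d]) (by omega) (by omega)
            (fun e he2 hed hedvd => by
              by_cases hedd : e < d
              · exact hdiv e he2 hedd (hedvd.trans hrdvd)
              · have : e = d := by omega
                subst this
                exact hrnd hedvd)
            (fun p hpp hps => hcov p hpp (le_trans hps hrle))
            (fun q hq => by
              rcases List.mem_append.mp hq with h | h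
              · exact ⟨(hacc q h).1, fun hc => (hacc q h).2 (hc.trans hrdvd)⟩
              · have : q = d := by simpa using h
                subst this
                exact ⟨h2, hrnd⟩)
          rw [htn1] at ihh
          exact ⟨by rw [hAside, hB]; exact ihh.1, by rw [hB]; exact ihh.2⟩
        · have hnd : ¬ d ∣ x := fun h => hmod ((PySem.Int.mod_eq_zero_iff_dvd x d).mpr h)
          have hAside : pvTrial (pvIntPrimes d.toNat limit) x acc
              = pvTrial (pvIntPrimes (d.toNat+1) limit) x acc := by
            rw [hlist]
            simp only [pvTrial]
            rw [if_neg (by omega : ¬ d*d > x), if_neg hmod]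
          have hB : pvBTrial (f+1) d x acc = pvBTrial f (d+1) x acc := by
            simp only [pvBTrial]
            rw [if_pos hle, if_neg hmod]
          have ihh := ih (d+1) x acc (by omega) (by omega)
            (fun e he2 hed hedvd => by
              by_cases hedd : e < d
              · exact hdiv e he2 hedd hedvd
              · have : e = d := by omega
                subst this
                exact hnd hedvd)
            hcov hacc
          rw [htn1] at ihh
          exact ⟨by rw [hAside, hB]; exact ihh.1, by rw [hB]; exact ihh.2⟩
      · have hd2N : 2 ≤ d.toNat := by omega
        have hnd : ¬ d ∣ x := by
          intro hdx
          have hmf := Nat.minFac_prime (show d.toNat ≠ 1 by omega)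
          have hmfd : (d.toNat).minFac ∣ d.toNat := Nat.minFac_dvd _
          have hlt : (d.toNat).minFac < d.toNat := by
            have hle' := Nat.minFac_le (show 0 < d.toNat by omega)
            rcases lt_or_eq_of_le hle' with h | h
            · exact h
            · exact absurd (Nat.prime_def_minFac.mpr ⟨hd2N, h⟩) hp
          have hmf2 : 2 ≤ (d.toNat).minFac := hmf.two_le
          refine hdiv ((d.toNat).minFac : Int) (by exact_mod_cast hmf2) (by omega) ?_
          have hd : ((d.toNat).minFac : Int) ∣ d := by
            have : ((d.toNat).minFac : Int) ∣ ((d.toNat : Nat) : Int) := Int.natCast_dvd_natCast.mpr hmfd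
            rwa [show ((d.toNat : Nat) : Int) = d by omega] at this
          exact hd.trans hdx
        have hmod : ¬ PySem.Int.mod x d = 0 := fun h => hnd ((PySem.Int.mod_eq_zero_iff_dvd x d).mp h)
        have hlisteq : pvIntPrimes d.toNat limit = pvIntPrimes (d.toNat+1) limit := by
          by_cases hdl : d.toNat ≤ limit
          · rw [pvIntPrimes_step d.toNat limit hdl, if_neg hp]
            rfl
          · rw [pvIntPrimes_eq_nil _ _ (by omega), pvIntPrimes_eq_nil _ _ (by omega)]
        have hB : pvBTrial (f+1) d x acc = pvBTrial f (d+1) x acc := by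
          simp only [pvBTrial]
          rw [if_pos hle, if_neg hmod]
        have ihh := ih (d+1) x acc (by omega) (by omega)
          (fun e he2 hed hedvd => by
            by_cases hedd : e < d
            · exact hdiv e he2 hedd hedvd
            · have : e = d := by omega
              subst this
              exact hnd hedvd)
          hcov hacc
        rw [htn1] at ihh
        exact ⟨by rw [hlisteq, hB]; exact ihh.1, by rw [hB]; exact ihh.2⟩
    · have hB : pvBTrial (f+1) d x acc = (x, acc) := by
        simp only [pvBTrial]
        rw [if_neg hle]
      rw [hB]
      exact ⟨pv_trial_break limit d x acc h2 (by omega), hacc⟩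

theorem pv_getD_eq (a : Array Bool) (i : Nat) (d : Bool) : a.getD i d = a[i]?.getD d := by
  simp [Array.getD]
  split <;> simp_all

theorem pv_getD_setIfInBounds (a : Array Bool) (i m : Nat) (v d : Bool) :
    (a.setIfInBounds i v).getD m d = if i = m ∧ m < a.size then v else a.getD m d := by
  rw [pv_getD_eq, pv_getD_eq, Array.getElem?_setIfInBounds]
  split_ifs with h1 h2 h3 h4 <;> simp_all

theorem pv_mark_size (l : List Int) : ∀ (a : Array Bool),
    (l.foldl (fun s j => s.setIfInBounds j.toNat false) a).size = a.size := by
  induction l with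
  | nil => intro a; rfl
  | cons j t ih => intro a; rw [List.foldl_cons, ih]; simp

theorem pv_mark_getD (l : List Int) : ∀ (a : Array Bool) (m : Nat),
    ((l.foldl (fun s j => s.setIfInBounds j.toNat false) a).getD m false)
      = if (∃ j ∈ l, j.toNat = m ∧ m < a.size) then false else a.getD m false := by
  induction l with
  | nil => intro a m; simp
  | cons j t ih =>
    intro a m
    rw [List.foldl_cons, ih, pv_getD_setIfInBounds]
    simp only [Array.size_setIfInBounds, List.exists_mem_cons_iff]
    by_cases hj : j.toNat = m ∧ m < a.size
    · simp [hj]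
    · by_cases ht : ∃ j' ∈ t, j'.toNat = m ∧ m < a.size
      · simp [ht]
      · simp [ht, hj]

def pvSieveInv (limit k : Nat) (st : List Int × Array Bool) : Prop :=
  st.1 = pvIntPrimes 2 (k-1) ∧ st.2.size = limit + 1 ∧
  ∀ m : Nat, m ≤ limit →
    (st.2.getD m false = true ↔ (2 ≤ m ∧ ∀ p : Nat, p < k → Nat.Prime p → p ∣ m → ¬ p * p ≤ m))

theorem pv_sieve_step (limit k : Nat) (st : List Int × Array Bool) (h2 : 2 ≤ k)
    (hk : k ≤ limit) (hinv : pvSieveInv limit k st) :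
    pvSieveInv limit (k+1) (pvSieveStep limit st (k : Int)) := by
  obtain ⟨hprimes, hsize, hchar⟩ := hinv
  have htoNat : ((k : Int)).toNat = k := by omega
  have hprime_iff : st.2.getD k false = true ↔ Nat.Prime k := by
    rw [hchar k hk]
    constructor
    · rintro ⟨-, hnop⟩
      by_contra hnp
      have hmf := Nat.minFac_prime (show k ≠ 1 by omega)
      have hdvd := Nat.minFac_dvd k
      have hlt : k.minFac < k := by
        have hle := Nat.minFac_le (show 0 < k by omega)
        rcases lt_or_eq_of_le hle with h | h
        · exact h
        · exact absurd (Nat.prime_def_minFac.mpr ⟨h2, h⟩) hnp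
      have hsq : k.minFac * k.minFac ≤ k := by
        have := Nat.minFac_sq_le_self (show 0 < k by omega) hnp
        nlinarith [this]
      exact hnop k.minFac hlt hmf hdvd hsq
    · intro hp
      refine ⟨h2, fun p hpk hpp hpd hps => ?_⟩
      rcases (Nat.Prime.eq_one_or_self_of_dvd hp p hpd) with h | h
      · exact absurd h hpp.ne_one
      · omega
  unfold pvSieveStep
  rw [htoNat]
  by_cases ht : st.2.getD k false = true
  · rw [if_pos ht]
    have hp : Nat.Prime k := hprime_iff.mp ht
    refine ⟨?_, ?_, ?_⟩
    · show st.1 ++ [(k : Int)] = pvIntPrimes 2 (k+1-1)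
      rw [hprimes, show k+1-1 = k from rfl, pvIntPrimes_concat k h2 hp]
    · show (_ : Array Bool).size = limit + 1
      rw [pv_mark_size]; exact hsize
    · intro m hm
      rw [pv_mark_getD]
      have hkpos : (0:Int) < (k:Int) := by omega
      have hmem : (∃ j ∈ PySem.List.pyRange ((k:Int)*(k:Int)) ((limit:Int)+1) (k:Int),
          j.toNat = m ∧ m < st.2.size) ↔ (k*k ≤ m ∧ k ∣ m) := by
        constructor
        · rintro ⟨j, hj, hjm, hms⟩
          rw [PySem.List.mem_pyRange_iff_of_pos hkpos] at hj
          obtain ⟨hj1, hj2, hj3⟩ := hj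
          have hj0 : (0:Int) ≤ j := le_trans (by positivity) hj1
          have hjcast : j = (m : Int) := by omega
          subst hjcast
          have hd : (k:Int) ∣ (m:Int) := by
            have := dvd_add hj3 (Dvd.intro (k:Int) rfl : (k:Int) ∣ (k:Int)*(k:Int))
            simpa using this
          refine ⟨?_, ?_⟩
          · have : ((k*k : Nat) : Int) ≤ (m : Int) := by push_cast; exact hj1
            exact_mod_cast this
          · exact_mod_cast hd
        · rintro ⟨hsq, hdvd⟩
          refine ⟨(m:Int), ?_, by omega, by omega⟩
          rw [PySem.List.mem_pyRange_iff_of_pos hkpos]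
          refine ⟨by exact_mod_cast hsq, by omega, ?_⟩
          have : (k:Int) ∣ (m:Int) := by exact_mod_cast hdvd
          exact dvd_sub this (Dvd.intro (k:Int) rfl)
      by_cases hM : k*k ≤ m ∧ k ∣ m
      · rw [if_pos (hmem.mpr hM)]
        constructor
        · intro h; exact absurd h (by simp)
        · rintro ⟨-, hall⟩
          exact absurd (hall k (by omega) hp hM.2) (by simpa using hM.1)
      · rw [if_neg (fun h => hM (hmem.mp h)), hchar m hm]
        constructor
        · rintro ⟨hm2, hall⟩
          refine ⟨hm2, fun p hpk1 hpp hpd hps => ?_⟩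
          by_cases hpk : p < k
          · exact hall p hpk hpp hpd hps
          · have : p = k := by omega
            subst this
            exact hM ⟨hps, hpd⟩
        · rintro ⟨hm2, hall⟩
          exact ⟨hm2, fun p hpk hpp hpd hps => hall p (by omega) hpp hpd hps⟩
  · rw [if_neg ht]
    have hnp : ¬ Nat.Prime k := fun h => ht (hprime_iff.mpr h)
    refine ⟨?_, hsize, ?_⟩
    · rw [hprimes, show k+1-1 = k from rfl, pvIntPrimes_concat_not k h2 hnp]
    · intro m hm
      rw [hchar m hm]
      constructor
      · rintro ⟨hm2, hall⟩
        refine ⟨hm2, fun p hpk1 hpp hpd hps => ?_⟩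
        by_cases hpk : p < k
        · exact hall p hpk hpp hpd hps
        · have : p = k := by omega
          subst this
          exact absurd hpp hnp
      · rintro ⟨hm2, hall⟩
        exact ⟨hm2, fun p hpk hpp hpd hps => hall p (by omega) hpp hpd hps⟩

theorem pv_sieve_fold (limit : Nat) : ∀ (c k : Nat) (st : List Int × Array Bool), 2 ≤ k →
    k + c = limit + 1 → pvSieveInv limit k st →
    pvSieveInv limit (limit + 1)
      ((PySem.List.pyRange (k : Int) ((limit : Int)+1) 1).foldl (pvSieveStep limit) st) := by
  intro c
  induction c with
  | zero =>
    intro k st h2 hc hinv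
    rw [PySem.List.pyRange_one_eq_nil (by omega)]
    rw [show k = limit + 1 by omega] at hinv
    exact hinv
  | succ c ih =>
    intro k st h2 hc hinv
    rw [PySem.List.pyRange_one_cons (by omega), List.foldl_cons]
    have := ih (k+1) (pvSieveStep limit st (k : Int)) (by omega) (by omega)
      (pv_sieve_step limit k st h2 (by omega) hinv)
    rw [show ((k : Int) + 1) = ((k+1 : Nat) : Int) by push_cast; ring]
    exact this

theorem pv_sieve_init (limit : Nat) :
    pvSieveInv limit 2 ([], ((Array.replicate (limit+1) true).setIfInBounds 0 false).setIfInBounds 1 false) := by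
  refine ⟨(pvIntPrimes_eq_nil 2 1 (by omega)).symm, by simp, ?_⟩
  intro m hm
  rw [pv_getD_setIfInBounds, pv_getD_setIfInBounds]
  simp only [Array.size_setIfInBounds, Array.size_replicate]
  have hrep : (Array.replicate (limit+1) true).getD m false = true := by
    rw [pv_getD_eq, Array.getElem?_replicate, if_pos (by omega)]; rfl
  by_cases h1 : m = 1
  · rw [if_pos ⟨h1.symm, by omega⟩]
    simp [h1]
  · rw [if_neg (fun h => h1 h.1.symm)]
    by_cases h0 : m = 0
    · rw [if_pos ⟨h0.symm, by omega⟩]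
      simp [h0]
    · rw [if_neg (fun h => h0 h.1.symm), hrep]
      simp only [true_iff]
      refine ⟨by omega, fun p hp2 hpp => ?_⟩
      have := hpp.two_le
      omega

theorem pv_primes_eq (limit : Nat) (h1 : 1 ≤ limit) : pvPrimes limit = pvIntPrimes 2 limit := by
  unfold pvPrimes
  have hfold := pv_sieve_fold limit (limit - 1) 2 _ (by omega) (by omega) (pv_sieve_init limit)
  have hcast : PySem.List.pyRange 2 ((limit : Int)+1) 1 = PySem.List.pyRange ((2:Nat) : Int) ((limit : Int)+1) 1 := by
    norm_num
  rw [hcast]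
  rw [hfold.1]
  rw [show limit + 1 - 1 = limit from rfl]

theorem pv_factors_eq (M v : Int) (hM : 0 ≤ M) (hvM : v ≤ M) :
    pvPrimeSet (pvPrimes (Nat.sqrt M.toNat + 1)) v = pvBFactors v := by
  have hcov : ∀ p : Nat, Nat.Prime p → (p:Int)*(p:Int) ≤ v → p ≤ Nat.sqrt M.toNat + 1 := by
    intro p hp hpv
    have h1 : ((p*p : Nat) : Int) ≤ M := by push_cast; exact le_trans hpv hvM
    have h2 : p*p ≤ M.toNat := by omega
    have := Nat.le_sqrt.mpr h2
    omega
  obtain ⟨heq, hacc⟩ := pv_sim (Nat.sqrt M.toNat + 1) (v.toNat + 2) 2 v []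
    (by norm_num) (by push_cast; omega) (fun e he2 hed => absurd he2 (by omega)) hcov (by simp)
  rw [show ((2:Int)).toNat = 2 from rfl] at heq
  unfold pvPrimeSet pvBFactors
  rw [pv_primes_eq _ (by omega)]
  rw [show (PySem.Set.empty : PySem.Set Int) = ([] : List Int) from rfl]
  rw [heq]
  by_cases h1 : (pvBTrial (v.toNat + 2) 2 v []).1 > 1
  · rw [if_pos h1, if_pos h1]
    have hnm : (pvBTrial (v.toNat + 2) 2 v []).1 ∉ (pvBTrial (v.toNat + 2) 2 v []).2 := by
      intro hmem
      exact (hacc _ hmem).2 (dvd_refl _)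
    simp [PySem.Set.add, hnm]
  · rw [if_neg h1, if_neg h1]

-- A's first/last dicts = B's first/last dicts (whenever max(nums) exists and is ≥ 0)
theorem pv_firstLast_eq (nums : List Int) (h : ∃ x ∈ nums, 0 ≤ x) :
    pvFirstLastB nums = pvFirstLast nums := by
  obtain ⟨x0, hx0, hx00⟩ := h
  obtain ⟨m, hm⟩ : ∃ m, PySem.List.max? nums (fun y => y) = some m := by
    cases hmax : PySem.List.max? nums (fun y => y) with
    | none =>
      rw [PySem.List.max?_eq_none_iff] at hmax
      subst hmax
      cases hx0
    | some m => exact ⟨m, rfl⟩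
  have hisMax := PySem.List.max?_isMax hm
  have hM0 : 0 ≤ (PySem.List.max? nums (fun y => y)).getD 0 := by
    rw [hm]
    exact le_trans hx00 (hisMax x0 hx0)
  simp only [pvFirstLast, pvFirstLastB]
  apply PySem.List.foldl_congr_mem
  intro acc iv hiv
  have hsnd : iv.2 ∈ nums := by
    have hmse := PySem.List.map_snd_enumerate nums (0:Int)
    rw [← hmse]
    exact List.mem_map_of_mem hiv
  rw [pv_factors_eq _ iv.2 hM0 (by rw [hm]; exact hisMax _ hsnd)]

-- ---------- part 2: A's diff-array scan = B's farthest-reach sweep (over the same dicts) ----------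

-- running sum of a prefix: take (j+1) adds getD j 0 (also true past the end)
theorem pv_sum_take_succ (l : List Int) (j : Nat) :
    (l.take (j+1)).sum = (l.take j).sum + l.getD j 0 := by
  induction l generalizing j with
  | nil => simp
  | cons x xs ih =>
    cases j with
    | zero => simp
    | succ j => simp [List.take_succ_cons, ih j]; omega

-- running max of a prefix, in range
theorem pv_foldl_max_take_succ (l : List Int) (j : Nat) (i0 : Int) (h : j < l.length) :
    (l.take (j+1)).foldl max i0 = max ((l.take j).foldl max i0) (l.getD j 0) := by
  induction l generalizing j i0 with
  | nil => simp at h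
  | cons x xs ih =>
    cases j with
    | zero => simp
    | succ j => simp at h; simp [List.take_succ_cons, ih j (max i0 x) h]

-- prefix-sum effect of one `l[j] += c`
theorem pv_sum_take_set (l : List Int) (j k : Nat) (c : Int) :
    ((l.set j (l.getD j 0 + c)).take k).sum
      = (l.take k).sum + (if j < k ∧ j < l.length then c else 0) := by
  induction l generalizing j k with
  | nil => simp
  | cons x xs ih =>
    cases j with
    | zero =>
      cases k with
      | zero => simp
      | succ k => simp [List.set_cons_zero]; omega
    | succ j =>
      cases k with
      | zero => simp
      | succ k =>
        simp only [List.getD_cons_succ, List.set_cons_succ, List.take_succ_cons, List.sum_cons,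
          List.length_cons, ih j k]
        have : (j < k ∧ j < xs.length) ↔ (j+1 < k+1 ∧ j+1 < xs.length+1) := by omega
        rw [if_congr this rfl rfl]; omega

-- pushing a max out of a foldl's initial value
theorem pv_foldl_max_out (l : List Int) (i b : Int) :
    l.foldl max (max i b) = max (l.foldl max i) b := by
  induction l generalizing i with
  | nil => rfl
  | cons x xs ih =>
    simp only [List.foldl_cons]
    rw [show max (max i b) x = max (max i x) b from max_right_comm i b x, ih]

-- prefix-max effect of raising one entry
theorem pv_foldl_max_take_set (l : List Int) (j k : Nat) (b i0 : Int)
    (hjk : j < k) (hjl : j < l.length) (hb : l.getD j 0 ≤ b) :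
    ((l.set j b).take k).foldl max i0 = max ((l.take k).foldl max i0) b := by
  induction l generalizing j k i0 with
  | nil => simp at hjl
  | cons x xs ih =>
    cases j with
    | zero =>
      cases k with
      | zero => omega
      | succ k =>
        simp only [List.set_cons_zero, List.take_succ_cons, List.foldl_cons]
        simp only [List.getD_cons_zero] at hb
        rw [← pv_foldl_max_out]
        congr 1
        omega
    | succ j =>
      cases k with
      | zero => omega
      | succ k =>
        simp only [List.set_cons_succ, List.take_succ_cons, List.foldl_cons]
        simp only [List.getD_cons_succ] at hb
        simp only [List.length_cons] at hjl
        exact ih j k (max i0 x) (by omega) (by omega) hb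

-- an in-range entry is below the prefix max
theorem pv_getD_le_foldl_max_take (l : List Int) (j k : Nat) (i0 : Int)
    (hjk : j < k) (hjl : j < l.length) :
    l.getD j 0 ≤ (l.take k).foldl max i0 := by
  have hmem : l.getD j 0 ∈ l.take k := by
    rw [List.getD_eq_getElem l 0 hjl]
    have : j < (l.take k).length := by simp; omega
    rw [show l[j] = (l.take k)[j] by simp]
    exact List.getElem_mem this
  exact (PySem.List.le_foldl_max (l.take k) i0).2 _ hmem

-- the diff array A builds: its prefix sums count the intervals crossing the prefix end
theorem pv_sum_take_buildDiff (pairs : List (Int × Int)) (d : List Int) (k : Nat)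
    (hb : ∀ ab ∈ pairs, 0 ≤ ab.1 ∧ ab.1 ≤ ab.2 ∧ ab.2 < (d.length : Int)) :
    ((pairs.foldl
        (fun diff ab =>
          if ab.1 < ab.2 then
            (diff.set ab.1.toNat (PySem.List.pyGetD diff ab.1 0 + 1)).set
              (ab.2.toNat)
              (PySem.List.pyGetD (diff.set ab.1.toNat (PySem.List.pyGetD diff ab.1 0 + 1)) ab.2 0 - 1)
          else diff) d).take k).sum
      = (d.take k).sum
        + ((pairs.countP (fun ab => decide (ab.1 < (k : Int) ∧ (k : Int) ≤ ab.2)) : Nat) : Int) := by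
  induction pairs generalizing d with
  | nil => simp
  | cons ab rest ih =>
    obtain ⟨ha, hab, hb2⟩ := hb ab (List.mem_cons_self ..)
    have hb0 : (0:Int) ≤ ab.2 := le_trans ha hab
    simp only [List.foldl_cons]
    by_cases hlt : ab.1 < ab.2
    · rw [if_pos hlt]
      set d1 := d.set ab.1.toNat (PySem.List.pyGetD d ab.1 0 + 1) with hd1
      set d2 := d1.set ab.2.toNat (PySem.List.pyGetD d1 ab.2 0 - 1) with hd2
      have hlen1 : d1.length = d.length := by rw [hd1]; simp
      have hlen2 : d2.length = d.length := by rw [hd2]; simp [hlen1]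
      rw [ih d2 (fun x hx => by rw [hlen2]; exact hb x (List.mem_cons_of_mem _ hx))]
      have e1 : (d1.take k).sum = (d.take k).sum + (if ab.1.toNat < k ∧ ab.1.toNat < d.length then 1 else 0) := by
        rw [hd1, PySem.List.pyGetD_of_nonneg d 0 ha]; exact pv_sum_take_set d ab.1.toNat k 1
      have e2 : (d2.take k).sum = (d1.take k).sum + (if ab.2.toNat < k ∧ ab.2.toNat < d1.length then -1 else 0) := by
        rw [hd2, PySem.List.pyGetD_of_nonneg d1 0 hb0]
        have := pv_sum_take_set d1 ab.2.toNat k (-1)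
        simpa using this
      rw [e2, e1, List.countP_cons, hlen1]
      simp only [decide_eq_true_eq]
      push_cast
      split_ifs <;> omega
    · rw [if_neg hlt]
      rw [ih d (fun x hx => hb x (List.mem_cons_of_mem _ hx))]
      have hnc : ¬(ab.1 < (k:Int) ∧ (k:Int) ≤ ab.2) := by omega
      simp [hnc]

-- the reach array B builds: its prefix max is a conditional running max over the pairs
theorem pv_foldl_max_take_buildReach (pairs : List (Int × Int)) (r : List Int) (k : Nat) (i0 : Int)
    (hb : ∀ ab ∈ pairs, 0 ≤ ab.1 ∧ ab.1 < (r.length : Int)) :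
    ((pairs.foldl
        (fun reach ab =>
          if PySem.List.pyGetD reach ab.1 0 < ab.2 then reach.set ab.1.toNat ab.2 else reach) r).take k).foldl max i0
      = pairs.foldl (fun m ab => if ab.1 < (k : Int) then max m ab.2 else m) ((r.take k).foldl max i0) := by
  induction pairs generalizing r with
  | nil => simp
  | cons ab rest ih =>
    obtain ⟨ha, hal⟩ := hb ab (List.mem_cons_self ..)
    simp only [List.foldl_cons]
    set r' := if PySem.List.pyGetD r ab.1 0 < ab.2 then r.set ab.1.toNat ab.2 else r with hr'
    have hlen : r'.length = r.length := by rw [hr']; split <;> simp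
    rw [ih r' (fun x hx => by rw [hlen]; exact hb x (List.mem_cons_of_mem _ hx))]
    congr 1
    rw [hr', PySem.List.pyGetD_of_nonneg r 0 ha]
    by_cases hlt : r.getD ab.1.toNat 0 < ab.2
    · rw [if_pos hlt]
      by_cases hak : ab.1 < (k : Int)
      · rw [if_pos hak]
        exact pv_foldl_max_take_set r ab.1.toNat k ab.2 i0 (by omega) (by omega) (le_of_lt hlt)
      · rw [if_neg hak, List.take_set, List.set_eq_of_length_le (by simp; omega)]
    · rw [if_neg hlt]
      by_cases hak : ab.1 < (k : Int)
      · rw [if_pos hak, eq_comm, max_eq_left]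
        exact le_trans (le_of_not_gt hlt) (pv_getD_le_foldl_max_take r ab.1.toNat k i0 (by omega) (by omega))
      · rw [if_neg hak]

-- the conditional running max is ≤ i iff every admitted pair ends by i
theorem pv_condB (pairs : List (Int × Int)) (kk i : Int) : ∀ (m : Int),
    (pairs.foldl (fun m ab => if ab.1 < kk then max m ab.2 else m) m ≤ i
      ↔ (m ≤ i ∧ ∀ ab ∈ pairs, ab.1 < kk → ab.2 ≤ i)) := by
  induction pairs with
  | nil => simp
  | cons ab rest ih =>
    intro m
    simp only [List.foldl_cons, List.forall_mem_cons]
    by_cases h : ab.1 < kk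
    · rw [if_pos h, ih]
      constructor
      · rintro ⟨h1, h2⟩; exact ⟨le_trans (le_max_left _ _) h1, fun _ => le_trans (le_max_right _ _) h1, h2⟩
      · rintro ⟨h1, h2, h3⟩; exact ⟨max_le h1 (h2 h), h3⟩
    · rw [if_neg h, ih]
      constructor
      · rintro ⟨h1, h2⟩; exact ⟨h1, fun hc => absurd hc h, h2⟩
      · rintro ⟨h1, _, h3⟩; exact ⟨h1, h3⟩

theorem pv_foldl_max_range_aux (j : Nat) :
    (((List.range (j+1)).map (fun k : Nat => (k : Int))).foldl max 0) = (j : Int) := by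
  induction j with
  | zero => simp
  | succ j ih =>
    rw [List.range_succ, List.map_append, List.foldl_append, ih]
    simp

-- prefix max of list(range(n))
theorem pv_foldl_max_take_range (n j : Nat) (hj : j < n) :
    (((PySem.List.pyRange 0 (n : Int) 1).take (j+1)).foldl max 0) = (j : Int) := by
  have h : PySem.List.pyRange 0 (n : Int) 1 = (List.range n).map (fun k : Nat => (k : Int)) := by
    simpa using PySem.List.pyRange_zero_natCast n
  rw [h, ← List.map_take, List.take_range, show min (j+1) n = j+1 by omega]
  exact pv_foldl_max_range_aux j

theorem pv_buildReach_length (pairs : List (Int × Int)) : ∀ (r : List Int),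
    (pairs.foldl
        (fun reach ab =>
          if PySem.List.pyGetD reach ab.1 0 < ab.2 then reach.set ab.1.toNat ab.2 else reach) r).length
      = r.length := by
  induction pairs with
  | nil => simp
  | cons ab rest ih => intro r; rw [List.foldl_cons, ih]; split <;> simp

-- inner fold: recording one index i for a set of primes preserves the first/last invariant
theorem pv_fl_inner (i : Int) (hi : 0 ≤ i) : ∀ (seen : List Int)
    (fl : PySem.Dict Int Int × PySem.Dict Int Int),
    (∀ p a, fl.1.get? p = some a → ∃ b, fl.2.get? p = some b ∧ 0 ≤ a ∧ a ≤ b ∧ b ≤ i) →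
    (∀ p a, (seen.foldl
        (fun fl p => (if fl.1.contains p then fl.1 else fl.1.insert p i, fl.2.insert p i))
        fl).1.get? p = some a →
      ∃ b, (seen.foldl
        (fun fl p => (if fl.1.contains p then fl.1 else fl.1.insert p i, fl.2.insert p i))
        fl).2.get? p = some b ∧ 0 ≤ a ∧ a ≤ b ∧ b ≤ i) := by
  intro seen
  induction seen with
  | nil => intro fl h; exact h
  | cons q rest ih =>
    intro fl h
    simp only [List.foldl_cons]
    apply ih
    intro p a hp
    by_cases hpq : p = q
    · subst hpq
      by_cases hc : fl.1.contains p
      · rw [if_pos hc] at hp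
        obtain ⟨b, hb, h0, h1, h2⟩ := h p a hp
        exact ⟨i, by simp, h0, le_trans h1 h2, le_refl i⟩
      · rw [if_neg hc] at hp
        rw [PySem.Dict.get?_insert] at hp
        simp at hp
        exact ⟨i, by simp, by omega, by omega, le_refl i⟩
    · rw [apply_ite (fun d => PySem.Dict.get? d p), PySem.Dict.get?_insert] at hp
      simp [hpq, ite_self] at hp
      obtain ⟨b, hb, h0, h1, h2⟩ := h p a hp
      exact ⟨b, by rw [PySem.Dict.get?_insert]; simp [hpq, hb], h0, h1, h2⟩

-- outer fold over enumerate: the invariant with the growing index bound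
theorem pv_fl_outer (seenOf : Int → List Int) :
    ∀ (xs : List Int) (s : Int) (fl : PySem.Dict Int Int × PySem.Dict Int Int), 0 ≤ s →
    (∀ p a, fl.1.get? p = some a → ∃ b, fl.2.get? p = some b ∧ 0 ≤ a ∧ a ≤ b ∧ b < s) →
    (∀ p a, ((PySem.List.enumerate xs s).foldl
        (fun fl iv => (seenOf iv.2).foldl
          (fun fl p => (if fl.1.contains p then fl.1 else fl.1.insert p iv.1, fl.2.insert p iv.1))
          fl)
        fl).1.get? p = some a →
      ∃ b, ((PySem.List.enumerate xs s).foldl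
        (fun fl iv => (seenOf iv.2).foldl
          (fun fl p => (if fl.1.contains p then fl.1 else fl.1.insert p iv.1, fl.2.insert p iv.1))
          fl)
        fl).2.get? p = some b ∧ 0 ≤ a ∧ a ≤ b ∧ b < s + (xs.length : Int)) := by
  intro xs
  induction xs with
  | nil =>
    intro s fl hs h p a hp
    simp only [PySem.List.enumerate_nil, List.foldl_nil] at hp ⊢
    obtain ⟨b, hb, h0, h1, h2⟩ := h p a hp
    exact ⟨b, hb, h0, h1, by simp; omega⟩
  | cons x rest ih =>
    intro s fl hs h
    rw [PySem.List.enumerate_cons, List.foldl_cons]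
    intro p a hp
    have step := pv_fl_inner s hs (seenOf x) fl
      (fun p a hpa => by obtain ⟨b, hb, h0, h1, h2⟩ := h p a hpa; exact ⟨b, hb, h0, h1, by omega⟩)
    obtain ⟨b, hb, h0, h1, h2⟩ := ih (s+1) _ (by omega)
      (fun p a hpa => by obtain ⟨b, hb, h0, h1, h2⟩ := step p a hpa; exact ⟨b, hb, h0, h1, by omega⟩)
      p a hp
    exact ⟨b, hb, h0, h1, by simp [List.length_cons] at h2 ⊢; omega⟩

-- the first/last dicts of pvFirstLast satisfy 0 ≤ first[p] ≤ last[p] < n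
theorem pv_firstLast_inv (nums : List Int) (p a : Int)
    (h : (pvFirstLast nums).1.get? p = some a) :
    ∃ b, (pvFirstLast nums).2.get? p = some b ∧ 0 ≤ a ∧ a ≤ b ∧ b < (nums.length : Int) := by
  simp only [pvFirstLast] at h ⊢
  obtain ⟨b, hb, h0, h1, h2⟩ :=
    pv_fl_outer _ nums 0 (PySem.Dict.empty, PySem.Dict.empty) le_rfl
      (fun q c hqc => by simp [PySem.Dict.get?_empty] at hqc) p a h
  exact ⟨b, hb, h0, h1, by simpa using h2⟩

-- the two scans agree when the two running conditions agree pointwise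
theorem pv_scan_eq (m : Nat) : ∀ (k e : Int) (diff reach : List Int),
    0 ≤ k → k + m = e → e ≤ (reach.length : Int) →
    (∀ i : Int, 0 ≤ i → i < e →
      (((diff.take (i.toNat+1)).sum = 0) ↔ ((reach.take (i.toNat+1)).foldl max 0 ≤ i))) →
    pvScanA (PySem.List.pyRange k e 1) ((diff.take k.toNat).sum) diff
      = pvScanB (PySem.List.pyRange k e 1) ((reach.take k.toNat).foldl max 0) reach := by
  induction m with
  | zero =>
    intro k e diff reach hk he hlen hpt
    have he' : PySem.List.pyRange k e 1 = [] := by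
      have : e = k := by omega
      rw [this]; simp [pysem]
    rw [he']
    rfl
  | succ m ih =>
    intro k e diff reach hk he hlen hpt
    have hke : k < e := by omega
    rw [PySem.List.pyRange_one_cons hke]
    show (if ((diff.take k.toNat).sum + PySem.List.pyGetD diff k 0) = 0
          then k else pvScanA _ _ diff)
       = (if (if ((reach.take k.toNat).foldl max 0) < PySem.List.pyGetD reach k 0
              then PySem.List.pyGetD reach k 0 else ((reach.take k.toNat).foldl max 0)) ≤ k
          then k else pvScanB _ _ reach)
    have hkl : k.toNat < reach.length := by omega
    have ecov : (diff.take k.toNat).sum + PySem.List.pyGetD diff k 0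
        = (diff.take (k.toNat+1)).sum := by
      rw [PySem.List.pyGetD_of_nonneg diff 0 hk, pv_sum_take_succ]
    have ecur : (if ((reach.take k.toNat).foldl max 0) < PySem.List.pyGetD reach k 0
              then PySem.List.pyGetD reach k 0 else ((reach.take k.toNat).foldl max 0))
        = (reach.take (k.toNat+1)).foldl max 0 := by
      rw [PySem.List.pyGetD_of_nonneg reach 0 hk, pv_foldl_max_take_succ reach k.toNat 0 hkl]
      rw [max_def]
      split_ifs <;> omega
    rw [ecov, ecur]
    have hcond := hpt k hk hke
    have erec : pvScanA (PySem.List.pyRange (k+1) e 1) ((diff.take (k.toNat+1)).sum) diff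
        = pvScanB (PySem.List.pyRange (k+1) e 1) ((reach.take (k.toNat+1)).foldl max 0) reach := by
      have e1 : (k+1).toNat = k.toNat + 1 := by omega
      have := ih (k+1) e diff reach (by omega) (by omega) hlen hpt
      rwa [e1] at this
    by_cases hc : (diff.take (k.toNat+1)).sum = 0
    · rw [if_pos hc, if_pos (hcond.mp hc)]
    · rw [if_neg hc, if_neg (fun h => hc (hcond.mpr h)), erec]

-- core assembly: for any pair list with 0 ≤ a ≤ b < n, A's diff-array scan equals B's reach sweep
theorem pv_main (n : Nat) (P : List (Int × Int)) (hn2 : 2 ≤ n)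
    (hPmem : ∀ ab ∈ P, 0 ≤ ab.1 ∧ ab.1 ≤ ab.2 ∧ ab.2 < (n : Int)) :
    pvScanA (PySem.List.pyRange 0 ((n : Int)-1) 1) 0
      (P.foldl
        (fun diff ab =>
          if ab.1 < ab.2 then
            (diff.set ab.1.toNat (PySem.List.pyGetD diff ab.1 0 + 1)).set
              (ab.2.toNat)
              (PySem.List.pyGetD (diff.set ab.1.toNat (PySem.List.pyGetD diff ab.1 0 + 1)) ab.2 0 - 1)
          else diff)
        (List.replicate (n+1) 0))
      = pvScanB (PySem.List.pyRange 0 ((n : Int)-1) 1) 0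
        (P.foldl
          (fun reach ab =>
            if PySem.List.pyGetD reach ab.1 0 < ab.2 then reach.set ab.1.toNat ab.2 else reach)
          (PySem.List.pyRange 0 (n : Int) 1)) := by
  have hr0 : PySem.List.pyRange 0 (n : Int) 1 = (List.range n).map (fun k : Nat => (k : Int)) := by
    simpa using PySem.List.pyRange_zero_natCast n
  have hr0len : (PySem.List.pyRange 0 (n : Int) 1).length = n := by rw [hr0]; simp
  have hRlen : (P.foldl
      (fun reach ab =>
        if PySem.List.pyGetD reach ab.1 0 < ab.2 then reach.set ab.1.toNat ab.2 else reach)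
      (PySem.List.pyRange 0 (n : Int) 1)).length = n := by
    rw [pv_buildReach_length]; exact hr0len
  have hpt : ∀ i : Int, 0 ≤ i → i < (n : Int) - 1 →
      ((((P.foldl
        (fun diff ab =>
          if ab.1 < ab.2 then
            (diff.set ab.1.toNat (PySem.List.pyGetD diff ab.1 0 + 1)).set
              (ab.2.toNat)
              (PySem.List.pyGetD (diff.set ab.1.toNat (PySem.List.pyGetD diff ab.1 0 + 1)) ab.2 0 - 1)
          else diff)
        (List.replicate (n+1) (0:Int))).take (i.toNat+1)).sum = 0)
        ↔ (((P.foldl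
          (fun reach ab =>
            if PySem.List.pyGetD reach ab.1 0 < ab.2 then reach.set ab.1.toNat ab.2 else reach)
          (PySem.List.pyRange 0 (n : Int) 1)).take (i.toNat+1)).foldl max 0 ≤ i)) := by
    intro i h0i hie
    have hj : (i.toNat : Int) = i := Int.toNat_of_nonneg h0i
    have hjn : i.toNat < n := by omega
    have hbd : ∀ ab ∈ P, 0 ≤ ab.1 ∧ ab.1 ≤ ab.2 ∧ ab.2 < ((List.replicate (n+1) (0:Int)).length : Int) := by
      intro ab hab; obtain ⟨x, y, z⟩ := hPmem ab hab
      refine ⟨x, y, ?_⟩; simp; omega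
    have hbr : ∀ ab ∈ P, 0 ≤ ab.1 ∧ ab.1 < ((PySem.List.pyRange 0 (n : Int) 1).length : Int) := by
      intro ab hab; obtain ⟨x, y, z⟩ := hPmem ab hab
      refine ⟨x, ?_⟩; rw [hr0len]; omega
    rw [pv_sum_take_buildDiff P (List.replicate (n+1) (0:Int)) (i.toNat+1) hbd]
    rw [pv_foldl_max_take_buildReach P (PySem.List.pyRange 0 (n : Int) 1) (i.toNat+1) 0 hbr]
    rw [pv_foldl_max_take_range n i.toNat hjn, hj, pv_condB]
    rw [List.take_replicate, List.sum_replicate]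
    simp only [smul_zero, zero_add, Nat.cast_eq_zero, List.countP_eq_zero, decide_eq_true_eq,
      le_refl, true_and]
    constructor
    · intro h ab hab hak
      obtain ⟨x, y, z⟩ := hPmem ab hab
      have := h ab hab
      omega
    · intro h ab hab
      obtain ⟨x, y, z⟩ := hPmem ab hab
      have := h ab hab
      omega
  have main := pv_scan_eq (n-1) 0 ((n : Int)-1) _ _ (le_refl 0)
    (by omega) (by rw [hRlen]; omega) hpt
  exact main

-- ===== VERDICT (by name: the statement is the Claim_ definition above) =====
theorem findValidSplit_spec : Claim_equal_findValidSplit := by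
  intro nums _ hpre
  unfold Spec_findValidSplit findValidSplit findValidSplit_alt
  by_cases hn : nums.length < 2
  · rw [if_pos hn, if_pos hn]
  · rw [if_neg hn, if_neg hn]
    have hn2 : 2 ≤ nums.length := by omega
    have hex : ∃ x ∈ nums, 0 ≤ x := by
      rcases hpre with h | h
      · omega
      · exact h
    rw [pv_firstLast_eq nums hex]
    have eD : ((pvFirstLast nums).1.keys.foldl
        (fun (diff : List Int) p =>
          let a := ((pvFirstLast nums).1.get? p).getD 0
          let b := ((pvFirstLast nums).2.get? p).getD 0
          if a < b then
            let d1 := diff.set a.toNat (PySem.List.pyGetD diff a 0 + 1)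
            d1.set b.toNat (PySem.List.pyGetD d1 b 0 - 1)
          else diff)
        (List.replicate (nums.length+1) (0:Int)))
        = (((pvFirstLast nums).1.keys.map
            (fun p => (((pvFirstLast nums).1.get? p).getD 0, ((pvFirstLast nums).2.get? p).getD 0))).foldl
          (fun (diff : List Int) (ab : Int × Int) =>
            if ab.1 < ab.2 then
              (diff.set ab.1.toNat (PySem.List.pyGetD diff ab.1 0 + 1)).set
                (ab.2.toNat)
                (PySem.List.pyGetD (diff.set ab.1.toNat (PySem.List.pyGetD diff ab.1 0 + 1)) ab.2 0 - 1)
            else diff)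
          (List.replicate (nums.length+1) (0:Int))) := by
      rw [List.foldl_map]
    have eR : ((pvFirstLast nums).1.keys.foldl
        (fun (reach : List Int) p =>
          let a := ((pvFirstLast nums).1.get? p).getD 0
          let b := ((pvFirstLast nums).2.get? p).getD 0
          if PySem.List.pyGetD reach a 0 < b then reach.set a.toNat b else reach)
        (PySem.List.pyRange 0 (nums.length : Int) 1))
        = (((pvFirstLast nums).1.keys.map
            (fun p => (((pvFirstLast nums).1.get? p).getD 0, ((pvFirstLast nums).2.get? p).getD 0))).foldl
          (fun (reach : List Int) (ab : Int × Int) =>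
            if PySem.List.pyGetD reach ab.1 0 < ab.2 then reach.set ab.1.toNat ab.2 else reach)
          (PySem.List.pyRange 0 (nums.length : Int) 1)) := by
      rw [List.foldl_map]
    have hPmem : ∀ ab ∈ ((pvFirstLast nums).1.keys.map
        (fun p => (((pvFirstLast nums).1.get? p).getD 0, ((pvFirstLast nums).2.get? p).getD 0))),
        0 ≤ ab.1 ∧ ab.1 ≤ ab.2 ∧ ab.2 < (nums.length : Int) := by
      intro ab hab
      obtain ⟨p, hp, rfl⟩ := List.mem_map.mp hab
      have hc : (pvFirstLast nums).1.contains p = true :=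
        (PySem.Dict.contains_iff_mem_keys _ _).mpr hp
      have hsome : ((pvFirstLast nums).1.get? p).isSome := by
        rw [← PySem.Dict.contains_eq_isSome_get?]; exact hc
      obtain ⟨a, ha⟩ := Option.isSome_iff_exists.mp hsome
      obtain ⟨b, hb, h0, h1, h2⟩ := pv_firstLast_inv nums p a ha
      simp only [ha, hb, Option.getD_some]
      exact ⟨h0, h1, h2⟩
    have main := pv_main nums.length _ hn2 hPmem
    show pvScanA (PySem.List.pyRange 0 ((nums.length : Int) - 1) 1) 0
        ((pvFirstLast nums).1.keys.foldl
          (fun (diff : List Int) p =>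
            let a := ((pvFirstLast nums).1.get? p).getD 0
            let b := ((pvFirstLast nums).2.get? p).getD 0
            if a < b then
              let d1 := diff.set a.toNat (PySem.List.pyGetD diff a 0 + 1)
              d1.set b.toNat (PySem.List.pyGetD d1 b 0 - 1)
            else diff)
          (List.replicate (nums.length+1) (0:Int)))
      = pvScanB (PySem.List.pyRange 0 ((nums.length : Int) - 1) 1) 0
        ((pvFirstLast nums).1.keys.foldl
          (fun (reach : List Int) p =>
            let a := ((pvFirstLast nums).1.get? p).getD 0
            let b := ((pvFirstLast nums).2.get? p).getD 0
            if PySem.List.pyGetD reach a 0 < b then reach.set a.toNat b else reach)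
          (PySem.List.pyRange 0 (nums.length : Int) 1))
    rw [eD, eR]
    exact main
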